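-- pv_equiv track=rewrite | github.com/Lokshaw-Chau/tau2-bench | scripts/render_tau2_summary.py | _ordered_domains
-- ===== SOURCE A (Python) =====
-- from typing import Any
--
-- PREFERRED_DOMAIN_ORDER = [
--     "airline",
--     "retail",
--     "telecom",
--     "banking_knowledge",
--     "mock",
-- ]
--
-- def _ordered_domains(manifests: list[dict[str, Any]]) -> list[str]:
--     seen: set[str] = set()
--     ordered: list[str] = []
--
--     for domain in PREFERRED_DOMAIN_ORDER:
--         for manifest in manifests:
--             if domain in manifest.get("domains", []) and domain not in seen:
--                 ordered.append(domain)
--                 seen.add(domain)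
--                 break
--
--     for manifest in manifests:
--         for domain in manifest.get("domains", []):
--             if domain not in seen:
--                 ordered.append(domain)
--                 seen.add(domain)
--
--     return ordered
-- ===== SOURCE B (Python) =====
-- PREFERRED_DOMAIN_ORDER = [
--     "airline",
--     "retail",
--     "telecom",
--     "banking_knowledge",
--     "mock",
-- ]
--
-- def _ordered_domains(manifests):
--     seen = set()
--     first_seen = []
--     for manifest in manifests:
--         for domain in manifest.get("domains", []):
--             if domain not in seen:
--                 seen.add(domain)
--                 first_seen.append(domain)
--     present = set(first_seen)
--     preferred = set(PREFERRED_DOMAIN_ORDER)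
--     return [d for d in PREFERRED_DOMAIN_ORDER if d in present] + \
--            [d for d in first_seen if d not in preferred]
-- ===== Notes on version B (the rewrite author's own statement) =====
-- stated objective: simpler
-- what changed: Instead of scanning all manifests once per preferred domain (with a break) and then a second dedup sweep, B builds the first-appearance index in a single pass and derives the answer by two membership filters (preferred-present first, then non-preferred in first-appearance order).
import Mathlib
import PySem

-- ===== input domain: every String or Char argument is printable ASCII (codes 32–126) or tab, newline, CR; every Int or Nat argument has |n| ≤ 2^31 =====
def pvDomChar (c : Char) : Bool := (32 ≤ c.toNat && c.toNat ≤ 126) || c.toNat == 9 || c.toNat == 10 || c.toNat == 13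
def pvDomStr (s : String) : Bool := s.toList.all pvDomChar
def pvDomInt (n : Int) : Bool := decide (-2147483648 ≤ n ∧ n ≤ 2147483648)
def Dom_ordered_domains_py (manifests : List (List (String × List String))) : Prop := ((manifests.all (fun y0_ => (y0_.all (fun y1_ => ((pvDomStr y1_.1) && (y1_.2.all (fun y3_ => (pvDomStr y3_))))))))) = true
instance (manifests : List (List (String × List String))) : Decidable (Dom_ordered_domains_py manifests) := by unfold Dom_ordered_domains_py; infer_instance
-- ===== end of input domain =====

-- B replaces A's per-preferred-domain rescans (with break) by one first-appearance
-- index pass plus two membership filters; objective: simpler. Return value only (no mutation).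

-- ===== PORT A =====
def pvPreferredDomainOrder : List String :=
  ["airline", "retail", "telecom", "banking_knowledge", "mock"]

-- manifest.get("domains", [])
def pvGetDomains (manifest : List (String × List String)) : List String :=
  PySem.Dict.getD (PySem.Dict.mk manifest) "domains" []

-- 'if domain not in seen: ordered.append(domain); seen.add(domain)' (A's 2nd loop = B's index pass)
def pvDedupStep (st : List String × PySem.Set String) (domain : String) :
    List String × PySem.Set String :=
  if domain ∉ st.2 then (st.1 ++ [domain], st.2.add domain) else st

-- A's inner 'for manifest in manifests: if …: append; add; break'
def pvScanBreak (domain : String) (st : List String × PySem.Set String) :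
    List (List (String × List String)) → List String × PySem.Set String
  | [] => st
  | manifest :: rest =>
    if domain ∈ pvGetDomains manifest ∧ domain ∉ st.2 then
      (st.1 ++ [domain], st.2.add domain)
    else pvScanBreak domain st rest

def ordered_domains_py (manifests : List (List (String × List String))) : List String :=
  let st1 := pvPreferredDomainOrder.foldl
      (fun st domain => pvScanBreak domain st manifests) ([], PySem.Set.empty)
  let st2 := manifests.foldl
      (fun st manifest => (pvGetDomains manifest).foldl pvDedupStep st) st1
  st2.1

-- ===== PORT B =====
def ordered_domains_py_alt (manifests : List (List (String × List String))) : List String :=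
  let firstSeen := (manifests.foldl
      (fun st manifest => (pvGetDomains manifest).foldl pvDedupStep st)
      ([], PySem.Set.empty)).1
  let present : PySem.Set String := PySem.Set.ofList firstSeen
  let preferred : PySem.Set String := PySem.Set.ofList pvPreferredDomainOrder
  pvPreferredDomainOrder.filter (fun d => decide (d ∈ present))
    ++ firstSeen.filter (fun d => decide (d ∉ preferred))

-- ===== PRECONDITION & SPEC =====
def Spec_ordered_domains_py (manifests : List (List (String × List String))) (out : List String) : Prop := out = ordered_domains_py_alt manifests
instance (manifests : List (List (String × List String))) (out : List String) : Decidable (Spec_ordered_domains_py manifests out) := by unfold Spec_ordered_domains_py; infer_instance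

-- ===== CLAIM (what is proved, stated in full; the proofs are below) =====
def Claim_equal_ordered_domains_py : Prop := ∀ (manifests : List (List (String × List String))), Dom_ordered_domains_py manifests → Spec_ordered_domains_py manifests (ordered_domains_py manifests)

-- ===== LEMMAS AND PROOFS =====

-- abstract "first occurrences of ds not already flagged by s"
def pvFO (s : String → Bool) : List String → List String
  | [] => []
  | d :: ds => if s d then pvFO s ds else d :: pvFO (fun x => x == d || s x) ds

theorem pvFO_congr (s t : String → Bool) (ds : List String)
    (h : ∀ x ∈ ds, s x = t x) : pvFO s ds = pvFO t ds := by
  induction ds generalizing s t with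
  | nil => rfl
  | cons d ds ih =>
    simp only [pvFO, h d (by simp)]
    split
    · exact ih _ _ (fun x hx => h x (by simp [hx]))
    · rw [ih (fun x => x == d || s x) (fun x => x == d || t x)
        (fun x hx => by show (x == d || s x) = (x == d || t x); rw [h x (by simp [hx])])]

theorem pvFO_mem (s : String → Bool) (ds : List String) (x : String) :
    x ∈ pvFO s ds ↔ x ∈ ds ∧ s x = false := by
  induction ds generalizing s with
  | nil => simp [pvFO]
  | cons d ds ih =>
    simp only [pvFO]
    split
    · rename_i hd
      rw [ih]
      simp only [List.mem_cons]
      constructor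
      · rintro ⟨hx, hs⟩; exact ⟨Or.inr hx, hs⟩
      · rintro ⟨hx | hx, hs⟩
        · subst hx; rw [hd] at hs; cases hs
        · exact ⟨hx, hs⟩
    · rename_i hd
      simp only [List.mem_cons, ih, Bool.or_eq_false_iff, beq_eq_false_iff_ne, ne_eq]
      constructor
      · rintro (hx | ⟨hx, hne, hs⟩)
        · subst hx; simp at hd; exact ⟨Or.inl rfl, hd⟩
        · exact ⟨Or.inr hx, hs⟩
      · rintro ⟨hx | hx, hs⟩
        · exact Or.inl hx
        · by_cases hxd : x = d
          · exact Or.inl hxd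
          · exact Or.inr ⟨hx, hxd, hs⟩

theorem pvFO_or (s t : String → Bool) (ds : List String) :
    pvFO (fun x => s x || t x) ds = (pvFO s ds).filter (fun x => !t x) := by
  induction ds generalizing s with
  | nil => simp [pvFO]
  | cons d ds ih =>
    by_cases hs : s d = true
    · simp only [pvFO, hs, if_true]
      exact ih s
    · replace hs : s d = false := by simpa using hs
      by_cases ht : t d = true
      · simp only [pvFO, hs, Bool.false_eq_true, if_false,
          List.filter_cons, ht, Bool.not_true]
        rw [← ih (fun x => x == d || s x)]
        refine pvFO_congr _ _ _ (fun x _ => ?_)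
        show (s x || t x) = (x == d || s x || t x)
        by_cases hxd : x = d
        · simp [hxd, ht]
        · rw [show (x == d) = false from beq_eq_false_iff_ne.mpr hxd, Bool.false_or]
      · replace ht : t d = false := by simpa using ht
        simp only [pvFO, hs, Bool.false_eq_true, if_false,
          List.filter_cons, ht, Bool.not_false, if_true]
        rw [← ih (fun x => x == d || s x)]
        refine congrArg (d :: ·) (pvFO_congr _ _ _ (fun x _ => ?_))
        show (x == d || (s x || t x)) = ((x == d || s x) || t x)
        simp [Bool.or_assoc]

theorem foldl_dedupStep (ds : List String) (st : List String × PySem.Set String) :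
    (ds.foldl pvDedupStep st).1 = st.1 ++ pvFO (fun x => decide (x ∈ st.2)) ds := by
  induction ds generalizing st with
  | nil => simp [pvFO]
  | cons d ds ih =>
    simp only [List.foldl_cons, pvDedupStep]
    by_cases hd : d ∈ st.2
    · rw [if_neg (fun h => h hd), ih st]
      congr 1
      simp only [pvFO, decide_eq_true hd, if_true]
    · rw [if_pos hd, ih]
      simp only [pvFO]
      rw [if_neg (by simp [hd]),
        pvFO_congr (fun x => decide (x ∈ (PySem.Set.add st.2 d)))
          (fun x => x == d || decide (x ∈ st.2)) ds (fun x _ => ?_)]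
      · simp
      · show decide (x ∈ PySem.Set.add st.2 d) = (x == d || decide (x ∈ st.2))
        by_cases hxd : x = d
        · subst hxd; simp [PySem.Set.mem_add]
        · simp [PySem.Set.mem_add, hxd]

theorem foldl_manifests (ms : List (List (String × List String)))
    (st : List String × PySem.Set String) :
    ms.foldl (fun st manifest => (pvGetDomains manifest).foldl pvDedupStep st) st
      = (ms.flatMap pvGetDomains).foldl pvDedupStep st := by
  induction ms generalizing st with
  | nil => rfl
  | cons m ms ih => simp only [List.foldl_cons, List.flatMap_cons, List.foldl_append, ih]

theorem pvScanBreak_spec (d : String) (o : List String) (s : PySem.Set String)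
    (hd : d ∉ s) (ms : List (List (String × List String))) :
    pvScanBreak d (o, s) ms =
      if ∃ m ∈ ms, d ∈ pvGetDomains m then (o ++ [d], s.add d) else (o, s) := by
  induction ms with
  | nil => simp [pvScanBreak]
  | cons m ms ih =>
    simp only [pvScanBreak]
    by_cases hm : d ∈ pvGetDomains m
    · rw [if_pos ⟨hm, hd⟩, if_pos ⟨m, by simp, hm⟩]
    · rw [if_neg (fun h => hm h.1), ih]
      by_cases hex : ∃ m' ∈ ms, d ∈ pvGetDomains m'
      · obtain ⟨m', hm', hdm⟩ := hex
        rw [if_pos ⟨m', hm', hdm⟩, if_pos ⟨m', by simp [hm'], hdm⟩]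
      · rw [if_neg hex, if_neg]
        rintro ⟨m', hmem, hdm⟩
        rcases List.mem_cons.mp hmem with rfl | hmem'
        · exact hm hdm
        · exact hex ⟨m', hmem', hdm⟩

theorem phase1_spec (ms : List (List (String × List String))) (P : List String)
    (o : List String) (s : PySem.Set String) (hnd : P.Nodup) (hs : ∀ d ∈ P, d ∉ s) :
    (P.foldl (fun st domain => pvScanBreak domain st ms) (o, s)).1
        = o ++ P.filter (fun d => decide (∃ m ∈ ms, d ∈ pvGetDomains m))
    ∧ ∀ x, (x ∈ (P.foldl (fun st domain => pvScanBreak domain st ms) (o, s)).2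
          ↔ x ∈ s ∨ (x ∈ P ∧ ∃ m ∈ ms, x ∈ pvGetDomains m)) := by
  induction P generalizing o s with
  | nil => simp
  | cons d P ih =>
    have hd : d ∉ s := hs d (by simp)
    simp only [List.foldl_cons, List.filter_cons]
    rw [pvScanBreak_spec d o s hd ms]
    by_cases hex : ∃ m ∈ ms, d ∈ pvGetDomains m
    · rw [if_pos hex, decide_eq_true hex]
      have hs' : ∀ e ∈ P, e ∉ PySem.Set.add s d := by
        intro e he
        simp only [PySem.Set.mem_add, not_or]
        exact ⟨hs e (by simp [he]), fun h => (List.nodup_cons.mp hnd).1 (h ▸ he)⟩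
      obtain ⟨h1, h2⟩ := ih (o ++ [d]) (PySem.Set.add s d) (List.nodup_cons.mp hnd).2 hs'
      refine ⟨by rw [h1]; simp, fun x => ?_⟩
      rw [h2 x]
      simp only [PySem.Set.mem_add, List.mem_cons]
      constructor
      · rintro ((h | h) | ⟨hx, hm⟩)
        · exact Or.inl h
        · exact Or.inr ⟨Or.inl h, h ▸ hex⟩
        · exact Or.inr ⟨Or.inr hx, hm⟩
      · rintro (h | ⟨hx | hx, hm⟩)
        · exact Or.inl (Or.inl h)
        · exact Or.inl (Or.inr hx)
        · exact Or.inr ⟨hx, hm⟩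
    · rw [if_neg hex, decide_eq_false hex]
      simp only [Bool.false_eq_true, if_false]
      obtain ⟨h1, h2⟩ := ih o s (List.nodup_cons.mp hnd).2 (fun e he => hs e (by simp [he]))
      refine ⟨h1, fun x => ?_⟩
      rw [h2 x]
      simp only [List.mem_cons]
      constructor
      · rintro (h | ⟨hx, hm⟩)
        · exact Or.inl h
        · exact Or.inr ⟨Or.inr hx, hm⟩
      · rintro (h | ⟨hx | hx, hm⟩)
        · exact Or.inl h
        · exact absurd (hx ▸ hm) hex
        · exact Or.inr ⟨hx, hm⟩

-- ===== VERDICT (by name: the statement is the Claim_ definition above) =====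
theorem ordered_domains_py_spec : Claim_equal_ordered_domains_py := by
  intro ms _
  unfold Spec_ordered_domains_py
  have hnd : pvPreferredDomainOrder.Nodup := by decide
  have hs0 : ∀ d ∈ pvPreferredDomainOrder, d ∉ (PySem.Set.empty : PySem.Set String) := by
    intro d _ h; simp [PySem.Set.empty] at h
  obtain ⟨h1, h2⟩ := phase1_spec ms pvPreferredDomainOrder [] PySem.Set.empty hnd hs0
  have hpresent : ∀ x, x ∈ pvFO (fun _ => false) (ms.flatMap pvGetDomains)
      ↔ ∃ m ∈ ms, x ∈ pvGetDomains m := by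
    intro x; rw [pvFO_mem]; simp [List.mem_flatMap]
  have hA : ordered_domains_py ms
      = pvPreferredDomainOrder.filter (fun d => decide (∃ m ∈ ms, d ∈ pvGetDomains m))
        ++ (pvFO (fun _ => false) (ms.flatMap pvGetDomains)).filter
             (fun x => !decide (x ∈ pvPreferredDomainOrder)) := by
    simp only [ordered_domains_py]
    rw [foldl_manifests, foldl_dedupStep, h1]
    simp only [List.nil_append]
    congr 1
    rw [pvFO_congr _ (fun x => false || decide (x ∈ pvPreferredDomainOrder)) _ ?_]
    · exact pvFO_or _ _ _
    · intro x hx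
      have hpres : ∃ m ∈ ms, x ∈ pvGetDomains m := List.mem_flatMap.mp hx
      simp only [Bool.false_or]
      refine decide_eq_decide.mpr ?_
      rw [h2 x]
      constructor
      · rintro (h | ⟨hp, _⟩)
        · simp [PySem.Set.empty] at h
        · exact hp
      · intro hp; exact Or.inr ⟨hp, hpres⟩
  have hB : ordered_domains_py_alt ms
      = pvPreferredDomainOrder.filter (fun d => decide (∃ m ∈ ms, d ∈ pvGetDomains m))
        ++ (pvFO (fun _ => false) (ms.flatMap pvGetDomains)).filter
             (fun x => !decide (x ∈ pvPreferredDomainOrder)) := by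
    simp only [ordered_domains_py_alt]
    rw [foldl_manifests, foldl_dedupStep]
    have hz : pvFO (fun x => decide (x ∈ (([], PySem.Set.empty) :
        List String × PySem.Set String).2)) (ms.flatMap pvGetDomains)
        = pvFO (fun _ => false) (ms.flatMap pvGetDomains) :=
      pvFO_congr _ _ _ (fun x _ => by simp [PySem.Set.empty])
    rw [hz]
    simp only [List.nil_append]
    congr 1
    · refine List.filter_congr (fun d _ => decide_eq_decide.mpr ?_)
      rw [PySem.Set.mem_ofList, hpresent d]
    · refine List.filter_congr (fun d _ => ?_)
      show decide (d ∉ PySem.Set.ofList pvPreferredDomainOrder)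
          = !decide (d ∈ pvPreferredDomainOrder)
      simp [PySem.Set.mem_ofList]
  exact hA.trans hB.symm
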